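-- pv_equiv track=rewrite | github.com/jwgwalton/PolarSeal | src/polarseal/validator.py | _types_match
-- ===== SOURCE A (Python) =====
-- def _types_match(actual_type: str, expected_type: str) -> bool:
--     """Check if actual type matches expected type.
--
--     Args:
--         actual_type: The actual Polars dtype as string.
--         expected_type: The expected type name.
--
--     Returns:
--         True if types match, False otherwise.
--     """
--     # Direct match
--     if actual_type == expected_type:
--         return True
--
--     # Handle common type aliases
--     type_aliases = {
--         "Int64": ["Int64", "i64"],
--         "Int32": ["Int32", "i32"],
--         "Int16": ["Int16", "i16"],
--         "Int8": ["Int8", "i8"],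
--         "UInt64": ["UInt64", "u64"],
--         "UInt32": ["UInt32", "u32"],
--         "UInt16": ["UInt16", "u16"],
--         "UInt8": ["UInt8", "u8"],
--         "Float64": ["Float64", "f64"],
--         "Float32": ["Float32", "f32"],
--         "String": ["String", "Utf8", "str"],
--         "Boolean": ["Boolean", "Bool"],
--     }
--
--     for canonical, aliases in type_aliases.items():
--         if expected_type in aliases and actual_type in aliases:
--             return True
--
--     return False
-- ===== SOURCE B (Python) =====
-- # B: flat alias->canonical index built once; two direct lookups replace the loop over groups.
-- _ALIAS_TO_CANON = {
--     "Int64": "Int64", "i64": "Int64",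
--     "Int32": "Int32", "i32": "Int32",
--     "Int16": "Int16", "i16": "Int16",
--     "Int8": "Int8", "i8": "Int8",
--     "UInt64": "UInt64", "u64": "UInt64",
--     "UInt32": "UInt32", "u32": "UInt32",
--     "UInt16": "UInt16", "u16": "UInt16",
--     "UInt8": "UInt8", "u8": "UInt8",
--     "Float64": "Float64", "f64": "Float64",
--     "Float32": "Float32", "f32": "Float32",
--     "String": "String", "Utf8": "String", "str": "String",
--     "Boolean": "Boolean", "Bool": "Boolean",
-- }
--
--
-- def _types_match(actual_type: str, expected_type: str) -> bool:
--     if actual_type == expected_type: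
--         return True
--     canon_actual = _ALIAS_TO_CANON.get(actual_type)
--     return canon_actual is not None and canon_actual == _ALIAS_TO_CANON.get(expected_type)
-- ===== Notes on version B (the rewrite author's own statement) =====
-- stated objective: simpler
-- what changed: Replaced the loop over alias groups with double membership tests by a flat alias-to-canonical dictionary built once; after the equality guard, both strings are looked up directly and compared.
import Mathlib
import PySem

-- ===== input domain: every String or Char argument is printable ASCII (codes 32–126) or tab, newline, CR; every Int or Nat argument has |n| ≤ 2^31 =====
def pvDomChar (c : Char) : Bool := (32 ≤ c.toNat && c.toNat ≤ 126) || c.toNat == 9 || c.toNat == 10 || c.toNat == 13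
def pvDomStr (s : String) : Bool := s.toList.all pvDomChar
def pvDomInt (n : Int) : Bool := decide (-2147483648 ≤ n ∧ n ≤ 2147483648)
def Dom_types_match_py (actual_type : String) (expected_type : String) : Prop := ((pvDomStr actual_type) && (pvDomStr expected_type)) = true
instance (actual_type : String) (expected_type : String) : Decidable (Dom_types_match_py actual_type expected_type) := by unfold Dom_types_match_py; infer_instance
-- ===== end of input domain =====

-- B replaces A's loop over alias groups by one flat alias→canonical dictionary and two direct lookups (objective: simpler).

-- ===== PORT A =====
def pvTypeAliases : List (String × List String) :=
  [("Int64", ["Int64", "i64"]),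
   ("Int32", ["Int32", "i32"]),
   ("Int16", ["Int16", "i16"]),
   ("Int8", ["Int8", "i8"]),
   ("UInt64", ["UInt64", "u64"]),
   ("UInt32", ["UInt32", "u32"]),
   ("UInt16", ["UInt16", "u16"]),
   ("UInt8", ["UInt8", "u8"]),
   ("Float64", ["Float64", "f64"]),
   ("Float32", ["Float32", "f32"]),
   ("String", ["String", "Utf8", "str"]),
   ("Boolean", ["Boolean", "Bool"])]

-- the 'for canonical, aliases in type_aliases.items():' loop with its early return
def pvMatchLoop (actual_type : String) (expected_type : String) : List (String × List String) → Bool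
  | [] => false
  | (_, aliases) :: rest =>
    if aliases.contains expected_type && aliases.contains actual_type then true
    else pvMatchLoop actual_type expected_type rest

def types_match_py (actual_type : String) (expected_type : String) : Bool :=
  if actual_type == expected_type then true
  else pvMatchLoop actual_type expected_type pvTypeAliases

-- ===== PORT B =====
def pvAliasToCanon : PySem.Dict String String := PySem.Dict.mk  -- dict literal with distinct keys: mk = ofList here
  [("Int64", "Int64"), ("i64", "Int64"),
   ("Int32", "Int32"), ("i32", "Int32"),
   ("Int16", "Int16"), ("i16", "Int16"),
   ("Int8", "Int8"), ("i8", "Int8"),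
   ("UInt64", "UInt64"), ("u64", "UInt64"),
   ("UInt32", "UInt32"), ("u32", "UInt32"),
   ("UInt16", "UInt16"), ("u16", "UInt16"),
   ("UInt8", "UInt8"), ("u8", "UInt8"),
   ("Float64", "Float64"), ("f64", "Float64"),
   ("Float32", "Float32"), ("f32", "Float32"),
   ("String", "String"), ("Utf8", "String"), ("str", "String"),
   ("Boolean", "Boolean"), ("Bool", "Boolean")]

def types_match_py_alt (actual_type : String) (expected_type : String) : Bool :=
  if actual_type == expected_type then true
  else
    match pvAliasToCanon.get? actual_type with
    | none => false            -- canon_actual is None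
    | some ca =>
      match pvAliasToCanon.get? expected_type with
      | none => false          -- str == None is False in Python
      | some ce => ca == ce

-- ===== PRECONDITION & SPEC =====
def Spec_types_match_py (actual_type : String) (expected_type : String) (out : Bool) : Prop := out = types_match_py_alt actual_type expected_type
instance (actual_type : String) (expected_type : String) (out : Bool) : Decidable (Spec_types_match_py actual_type expected_type out) := by unfold Spec_types_match_py; infer_instance

-- ===== CLAIM (what is proved, stated in full; the proofs are below) =====
def Claim_equal_types_match_py : Prop := ∀ (actual_type : String) (expected_type : String), Dom_types_match_py actual_type expected_type → Spec_types_match_py actual_type expected_type (types_match_py actual_type expected_type)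

-- ===== LEMMAS AND PROOFS =====

theorem canon_lookup (s : String) :
    pvAliasToCanon.get? s =
      if "Int64" == s then some "Int64" else
      if "i64" == s then some "Int64" else
      if "Int32" == s then some "Int32" else
      if "i32" == s then some "Int32" else
      if "Int16" == s then some "Int16" else
      if "i16" == s then some "Int16" else
      if "Int8" == s then some "Int8" else
      if "i8" == s then some "Int8" else
      if "UInt64" == s then some "UInt64" else
      if "u64" == s then some "UInt64" else
      if "UInt32" == s then some "UInt32" else
      if "u32" == s then some "UInt32" else
      if "UInt16" == s then some "UInt16" else
      if "u16" == s then some "UInt16" else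
      if "UInt8" == s then some "UInt8" else
      if "u8" == s then some "UInt8" else
      if "Float64" == s then some "Float64" else
      if "f64" == s then some "Float64" else
      if "Float32" == s then some "Float32" else
      if "f32" == s then some "Float32" else
      if "String" == s then some "String" else
      if "Utf8" == s then some "String" else
      if "str" == s then some "String" else
      if "Boolean" == s then some "Boolean" else
      if "Bool" == s then some "Boolean" else none := by
  simp only [pvAliasToCanon, PySem.Dict.get?_mk_cons]
  simp [PySem.Dict.get?]

theorem canon_none (s : String) (h0 : s ≠ "Int64") (h1 : s ≠ "i64") (h2 : s ≠ "Int32") (h3 : s ≠ "i32") (h4 : s ≠ "Int16") (h5 : s ≠ "i16") (h6 : s ≠ "Int8") (h7 : s ≠ "i8") (h8 : s ≠ "UInt64") (h9 : s ≠ "u64") (h10 : s ≠ "UInt32") (h11 : s ≠ "u32") (h12 : s ≠ "UInt16") (h13 : s ≠ "u16") (h14 : s ≠ "UInt8") (h15 : s ≠ "u8") (h16 : s ≠ "Float64") (h17 : s ≠ "f64") (h18 : s ≠ "Float32") (h19 : s ≠ "f32") (h20 : s ≠ "String") (h21 : s ≠ "Utf8") (h22 : s ≠ "str") (h23 : s ≠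 "Boolean") (h24 : s ≠ "Bool") :
    pvAliasToCanon.get? s = none := by
  rw [canon_lookup]
  have e0 : ("Int64" == s) = false := beq_eq_false_iff_ne.mpr (Ne.symm h0)
  have e1 : ("i64" == s) = false := beq_eq_false_iff_ne.mpr (Ne.symm h1)
  have e2 : ("Int32" == s) = false := beq_eq_false_iff_ne.mpr (Ne.symm h2)
  have e3 : ("i32" == s) = false := beq_eq_false_iff_ne.mpr (Ne.symm h3)
  have e4 : ("Int16" == s) = false := beq_eq_false_iff_ne.mpr (Ne.symm h4)
  have e5 : ("i16" == s) = false := beq_eq_false_iff_ne.mpr (Ne.symm h5)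
  have e6 : ("Int8" == s) = false := beq_eq_false_iff_ne.mpr (Ne.symm h6)
  have e7 : ("i8" == s) = false := beq_eq_false_iff_ne.mpr (Ne.symm h7)
  have e8 : ("UInt64" == s) = false := beq_eq_false_iff_ne.mpr (Ne.symm h8)
  have e9 : ("u64" == s) = false := beq_eq_false_iff_ne.mpr (Ne.symm h9)
  have e10 : ("UInt32" == s) = false := beq_eq_false_iff_ne.mpr (Ne.symm h10)
  have e11 : ("u32" == s) = false := beq_eq_false_iff_ne.mpr (Ne.symm h11)
  have e12 : ("UInt16" == s) = false := beq_eq_false_iff_ne.mpr (Ne.symm h12)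
  have e13 : ("u16" == s) = false := beq_eq_false_iff_ne.mpr (Ne.symm h13)
  have e14 : ("UInt8" == s) = false := beq_eq_false_iff_ne.mpr (Ne.symm h14)
  have e15 : ("u8" == s) = false := beq_eq_false_iff_ne.mpr (Ne.symm h15)
  have e16 : ("Float64" == s) = false := beq_eq_false_iff_ne.mpr (Ne.symm h16)
  have e17 : ("f64" == s) = false := beq_eq_false_iff_ne.mpr (Ne.symm h17)
  have e18 : ("Float32" == s) = false := beq_eq_false_iff_ne.mpr (Ne.symm h18)
  have e19 : ("f32" == s) = false := beq_eq_false_iff_ne.mpr (Ne.symm h19)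
  have e20 : ("String" == s) = false := beq_eq_false_iff_ne.mpr (Ne.symm h20)
  have e21 : ("Utf8" == s) = false := beq_eq_false_iff_ne.mpr (Ne.symm h21)
  have e22 : ("str" == s) = false := beq_eq_false_iff_ne.mpr (Ne.symm h22)
  have e23 : ("Boolean" == s) = false := beq_eq_false_iff_ne.mpr (Ne.symm h23)
  have e24 : ("Bool" == s) = false := beq_eq_false_iff_ne.mpr (Ne.symm h24)
  simp only [e0, e1, e2, e3, e4, e5, e6, e7, e8, e9, e10, e11, e12, e13, e14, e15, e16, e17, e18, e19, e20, e21, e22, e23, e24, Bool.false_eq_true, if_false]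

theorem loop_false_right (actual_type e : String) (h0 : e ≠ "Int64") (h1 : e ≠ "i64") (h2 : e ≠ "Int32") (h3 : e ≠ "i32") (h4 : e ≠ "Int16") (h5 : e ≠ "i16") (h6 : e ≠ "Int8") (h7 : e ≠ "i8") (h8 : e ≠ "UInt64") (h9 : e ≠ "u64") (h10 : e ≠ "UInt32") (h11 : e ≠ "u32") (h12 : e ≠ "UInt16") (h13 : e ≠ "u16") (h14 : e ≠ "UInt8") (h15 : e ≠ "u8") (h16 : e ≠ "Float64") (h17 : e ≠ "f64") (h18 : e ≠ "Float32") (h19 : e ≠ "f32") (h20 : e ≠ "String") (h21 : e ≠ "Utf8") (h22 : e ≠ "str") (h23 : e ≠ "Boolean") (h24 : e ≠ "Bool") :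
    pvMatchLoop actual_type e pvTypeAliases = false := by
  have c0 : (["Int64","i64"].contains e) = false := by simp [List.contains_eq_mem, h0, h1]
  have c1 : (["Int32","i32"].contains e) = false := by simp [List.contains_eq_mem, h2, h3]
  have c2 : (["Int16","i16"].contains e) = false := by simp [List.contains_eq_mem, h4, h5]
  have c3 : (["Int8","i8"].contains e) = false := by simp [List.contains_eq_mem, h6, h7]
  have c4 : (["UInt64","u64"].contains e) = false := by simp [List.contains_eq_mem, h8, h9]
  have c5 : (["UInt32","u32"].contains e) = false := by simp [List.contains_eq_mem, h10, h11]
  have c6 : (["UInt16","u16"].contains e) = false := by simp [List.contains_eq_mem, h12, h13]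
  have c7 : (["UInt8","u8"].contains e) = false := by simp [List.contains_eq_mem, h14, h15]
  have c8 : (["Float64","f64"].contains e) = false := by simp [List.contains_eq_mem, h16, h17]
  have c9 : (["Float32","f32"].contains e) = false := by simp [List.contains_eq_mem, h18, h19]
  have c10 : (["String","Utf8","str"].contains e) = false := by simp [List.contains_eq_mem, h20, h21, h22]
  have c11 : (["Boolean","Bool"].contains e) = false := by simp [List.contains_eq_mem, h23, h24]
  simp only [pvMatchLoop, pvTypeAliases, c0, c1, c2, c3, c4, c5, c6, c7, c8, c9, c10, c11, Bool.false_and, Bool.false_eq_true, if_false]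

theorem loop_false_left (a expected_type : String) (h0 : a ≠ "Int64") (h1 : a ≠ "i64") (h2 : a ≠ "Int32") (h3 : a ≠ "i32") (h4 : a ≠ "Int16") (h5 : a ≠ "i16") (h6 : a ≠ "Int8") (h7 : a ≠ "i8") (h8 : a ≠ "UInt64") (h9 : a ≠ "u64") (h10 : a ≠ "UInt32") (h11 : a ≠ "u32") (h12 : a ≠ "UInt16") (h13 : a ≠ "u16") (h14 : a ≠ "UInt8") (h15 : a ≠ "u8") (h16 : a ≠ "Float64") (h17 : a ≠ "f64") (h18 : a ≠ "Float32") (h19 : a ≠ "f32") (h20 : a ≠ "String") (h21 : a ≠ "Utf8") (h22 : a ≠ "str") (h23 : a ≠ "Boolean") (h24 : a ≠ "Bool") :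
    pvMatchLoop a expected_type pvTypeAliases = false := by
  have c0 : (["Int64","i64"].contains a) = false := by simp [List.contains_eq_mem, h0, h1]
  have c1 : (["Int32","i32"].contains a) = false := by simp [List.contains_eq_mem, h2, h3]
  have c2 : (["Int16","i16"].contains a) = false := by simp [List.contains_eq_mem, h4, h5]
  have c3 : (["Int8","i8"].contains a) = false := by simp [List.contains_eq_mem, h6, h7]
  have c4 : (["UInt64","u64"].contains a) = false := by simp [List.contains_eq_mem, h8, h9]
  have c5 : (["UInt32","u32"].contains a) = false := by simp [List.contains_eq_mem, h10, h11]
  have c6 : (["UInt16","u16"].contains a) = false := by simp [List.contains_eq_mem, h12, h13]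
  have c7 : (["UInt8","u8"].contains a) = false := by simp [List.contains_eq_mem, h14, h15]
  have c8 : (["Float64","f64"].contains a) = false := by simp [List.contains_eq_mem, h16, h17]
  have c9 : (["Float32","f32"].contains a) = false := by simp [List.contains_eq_mem, h18, h19]
  have c10 : (["String","Utf8","str"].contains a) = false := by simp [List.contains_eq_mem, h20, h21, h22]
  have c11 : (["Boolean","Bool"].contains a) = false := by simp [List.contains_eq_mem, h23, h24]
  simp only [pvMatchLoop, pvTypeAliases, c0, c1, c2, c3, c4, c5, c6, c7, c8, c9, c10, c11, Bool.and_false, Bool.false_eq_true, if_false]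

def pvAliasList : List String := ["Int64", "i64", "Int32", "i32", "Int16", "i16", "Int8", "i8", "UInt64", "u64", "UInt32", "u32", "UInt16", "u16", "UInt8", "u8", "Float64", "f64", "Float32", "f32", "String", "Utf8", "str", "Boolean", "Bool"]

set_option maxHeartbeats 4000000 in
theorem inner_eq (a e : String) :
    pvMatchLoop a e pvTypeAliases =
      (match pvAliasToCanon.get? a, pvAliasToCanon.get? e with
       | some ca, some ce => ca == ce
       | _, _ => false) := by
  by_cases ha : a ∈ pvAliasList
  · rcases (show a = "Int64" ∨ a = "i64" ∨ a = "Int32" ∨ a = "i32" ∨ a = "Int16" ∨ a = "i16" ∨ a = "Int8" ∨ a = "i8" ∨ a = "UInt64" ∨ a = "u64" ∨ a = "UInt32" ∨ a = "u32" ∨ a = "UInt16" ∨ a = "u16" ∨ a = "UInt8" ∨ a = "u8" ∨ a = "Float64" ∨ a = "f64" ∨ a = "Float32" ∨ a = "f32" ∨ a = "String" ∨ a = "Utf8" ∨ a = "str" ∨ a = "Boolean" ∨ a = "Bool" by simpa [pvAliasList] using ha) with rfl|rfl|rfl|rfl|rfl|rfl|rfl|rfl|rfl|rfl|rfl|rfl|rfl|rfl|rfl|rfl|rfl|rfl|rfl|rfl|rfl|rfl|rfl|rfl|rfl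 <;>
    · by_cases he : e ∈ pvAliasList
      · rcases (show e = "Int64" ∨ e = "i64" ∨ e = "Int32" ∨ e = "i32" ∨ e = "Int16" ∨ e = "i16" ∨ e = "Int8" ∨ e = "i8" ∨ e = "UInt64" ∨ e = "u64" ∨ e = "UInt32" ∨ e = "u32" ∨ e = "UInt16" ∨ e = "u16" ∨ e = "UInt8" ∨ e = "u8" ∨ e = "Float64" ∨ e = "f64" ∨ e = "Float32" ∨ e = "f32" ∨ e = "String" ∨ e = "Utf8" ∨ e = "str" ∨ e = "Boolean" ∨ e = "Bool" by simpa [pvAliasList] using he) with rfl|rfl|rfl|rfl|rfl|rfl|rfl|rfl|rfl|rfl|rfl|rfl|rfl|rfl|rfl|rfl|rfl|rfl|rfl|rfl|rfl|rfl|rfl|rfl|rfl <;> decide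
      · simp only [pvAliasList, List.mem_cons, List.not_mem_nil, or_false, not_or] at he
        obtain ⟨he0, he1, he2, he3, he4, he5, he6, he7, he8, he9, he10, he11, he12, he13, he14, he15, he16, he17, he18, he19, he20, he21, he22, he23, he24⟩ := he
        rw [loop_false_right _ _ he0 he1 he2 he3 he4 he5 he6 he7 he8 he9 he10 he11 he12 he13 he14 he15 he16 he17 he18 he19 he20 he21 he22 he23 he24, canon_none _ he0 he1 he2 he3 he4 he5 he6 he7 he8 he9 he10 he11 he12 he13 he14 he15 he16 he17 he18 he19 he20 he21 he22 he23 he24]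
        decide
  · simp only [pvAliasList, List.mem_cons, List.not_mem_nil, or_false, not_or] at ha
    obtain ⟨ha0, ha1, ha2, ha3, ha4, ha5, ha6, ha7, ha8, ha9, ha10, ha11, ha12, ha13, ha14, ha15, ha16, ha17, ha18, ha19, ha20, ha21, ha22, ha23, ha24⟩ := ha
    rw [loop_false_left _ _ ha0 ha1 ha2 ha3 ha4 ha5 ha6 ha7 ha8 ha9 ha10 ha11 ha12 ha13 ha14 ha15 ha16 ha17 ha18 ha19 ha20 ha21 ha22 ha23 ha24, canon_none _ ha0 ha1 ha2 ha3 ha4 ha5 ha6 ha7 ha8 ha9 ha10 ha11 ha12 ha13 ha14 ha15 ha16 ha17 ha18 ha19 ha20 ha21 ha22 ha23 ha24]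

-- ===== VERDICT (by name: the statement is the Claim_ definition above) =====
theorem types_match_py_spec : Claim_equal_types_match_py := by
  intro a e _
  unfold Spec_types_match_py types_match_py types_match_py_alt
  by_cases h : a == e
  · simp [h]
  · simp only [h, if_false, Bool.false_eq_true]
    rw [inner_eq]
    cases pvAliasToCanon.get? a <;> cases pvAliasToCanon.get? e <;> rfl
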